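-- pv_equiv track=rewrite | github.com/solyarikai/Sally_sales | scripts/uae_pk_v7_score.py | get_role_tier
-- ===== SOURCE A (Python) =====
-- ANTI_TITLES = ['intern', 'student', 'freelanc', 'looking for', 'seeking',
--                'unemployed', 'open to work', 'trainee', 'apprentice',
--                'virtual assistant', 'receptionist', 'driver', 'security guard',
--                'cleaner', 'waiter', 'cashier']
--
-- def get_role_tier(title):
--     if not title:
--         return 7, 10
--     t = title.lower()
--     for anti in ANTI_TITLES:
--         if anti in t:
--             return 99, 0
--
--     tiers = [
--         (1, 100, ['cfo', 'chief financial', 'finance director', 'head of finance', 'vp finance',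
--                   'payroll', 'controller', 'treasurer', 'financial controller']),
--         (2, 90, ['coo', 'chief operating', 'operations director', 'head of operations',
--                  'vp operations', 'operations manager', 'chief admin']),
--         (3, 85, ['hr director', 'head of hr', 'head of people', 'hr manager',
--                  'people & culture', 'chief human', 'vp people', 'head of talent']),
--         (4, 70, ['ceo', 'chief executive', 'founder', 'co-founder', 'owner',
--                  'managing director', 'general manager', 'president', 'sole proprietor']),
--         (5, 50, ['cto', 'chief technology', 'vp engineering', 'head of engineering',
--                  'engineering director', 'technical director']),
--         (6, 30, ['head of sales', 'sales director', 'business development',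
--                  'commercial director', 'chief revenue']),
--     ]
--     for tier, score, keywords in tiers:
--         for kw in keywords:
--             if kw in t:
--                 return tier, score
--     return 7, 10
-- ===== SOURCE B (Python) =====
-- ANTI_TITLES = ['intern', 'student', 'freelanc', 'looking for', 'seeking',
--                'unemployed', 'open to work', 'trainee', 'apprentice',
--                'virtual assistant', 'receptionist', 'driver', 'security guard',
--                'cleaner', 'waiter', 'cashier']
--
-- TIER_KEYWORDS = [
--     (1, ['cfo', 'chief financial', 'finance director', 'head of finance', 'vp finance',
--          'payroll', 'controller', 'treasurer', 'financial controller']),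
--     (2, ['coo', 'chief operating', 'operations director', 'head of operations',
--          'vp operations', 'operations manager', 'chief admin']),
--     (3, ['hr director', 'head of hr', 'head of people', 'hr manager',
--          'people & culture', 'chief human', 'vp people', 'head of talent']),
--     (4, ['ceo', 'chief executive', 'founder', 'co-founder', 'owner',
--          'managing director', 'general manager', 'president', 'sole proprietor']),
--     (5, ['cto', 'chief technology', 'vp engineering', 'head of engineering',
--          'engineering director', 'technical director']),
--     (6, ['head of sales', 'sales director', 'business development',
--          'commercial director', 'chief revenue']),
-- ]
--
-- TIER_SCORE = {1: 100, 2: 90, 3: 85, 4: 70, 5: 50, 6: 30}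
--
-- def get_role_tier(title):
--     if not title:
--         return 7, 10
--     t = title.lower()
--     if any(anti in t for anti in ANTI_TITLES):
--         return 99, 0
--     hits = [tier for tier, kws in TIER_KEYWORDS if any(kw in t for kw in kws)]
--     best = min(hits, default=None)
--     if best is None:
--         return 7, 10
--     return best, TIER_SCORE[best]
-- ===== Notes on version B (the rewrite author's own statement) =====
-- stated objective: alternative
-- what changed: Instead of early-returning at the first keyword hit inside nested loops over the tier table, B collects every tier whose keyword list has a substring hit into a list and returns the minimum tier number with its score from a tier->score map, defaulting to (7,10) when no tier matches.
import Mathlib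
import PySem

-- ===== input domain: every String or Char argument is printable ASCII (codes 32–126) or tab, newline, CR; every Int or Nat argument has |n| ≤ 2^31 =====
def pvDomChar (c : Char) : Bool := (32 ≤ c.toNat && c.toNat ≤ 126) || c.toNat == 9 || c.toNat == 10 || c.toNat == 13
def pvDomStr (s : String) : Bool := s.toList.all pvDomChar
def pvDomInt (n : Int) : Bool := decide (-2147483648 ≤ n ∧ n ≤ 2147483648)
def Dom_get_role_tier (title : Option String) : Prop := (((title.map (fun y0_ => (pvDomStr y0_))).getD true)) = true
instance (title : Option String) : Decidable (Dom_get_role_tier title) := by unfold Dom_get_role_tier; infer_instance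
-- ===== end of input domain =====

-- B collects all matching tiers and returns the minimum tier with its score, instead of A's
-- first-match early return over the nested tier/keyword loops (objective: alternative decomposition).

-- ===== PORT A =====
def antiTitles : List String :=
  ["intern", "student", "freelanc", "looking for", "seeking",
   "unemployed", "open to work", "trainee", "apprentice",
   "virtual assistant", "receptionist", "driver", "security guard",
   "cleaner", "waiter", "cashier"]

def tiersA : List (Int × Int × List String) :=
  [(1, 100, ["cfo", "chief financial", "finance director", "head of finance", "vp finance",
             "payroll", "controller", "treasurer", "financial controller"]),
   (2, 90, ["coo", "chief operating", "operations director", "head of operations",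
            "vp operations", "operations manager", "chief admin"]),
   (3, 85, ["hr director", "head of hr", "head of people", "hr manager",
            "people & culture", "chief human", "vp people", "head of talent"]),
   (4, 70, ["ceo", "chief executive", "founder", "co-founder", "owner",
            "managing director", "general manager", "president", "sole proprietor"]),
   (5, 50, ["cto", "chief technology", "vp engineering", "head of engineering",
            "engineering director", "technical director"]),
   (6, 30, ["head of sales", "sales director", "business development",
            "commercial director", "chief revenue"])]

-- inner 'for kw in keywords: if kw in t: return tier, score'
def loopKws (t : String) (tier score : Int) : List String → Option (Int × Int)
  | [] => none
  | kw :: rest => if PySem.Str.isIn kw t then some (tier, score) else loopKws t tier score rest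

-- outer 'for tier, score, keywords in tiers: … ; return 7, 10'
def loopTiers (t : String) : List (Int × Int × List String) → Int × Int
  | [] => (7, 10)
  | (tier, score, kws) :: rest =>
    match loopKws t tier score kws with
    | some r => r
    | none => loopTiers t rest

-- 'for anti in ANTI_TITLES: if anti in t: return 99, 0'
def loopAnti (t : String) : List String → Bool
  | [] => false
  | a :: rest => if PySem.Str.isIn a t then true else loopAnti t rest

def get_role_tier (title : Option String) : Int × Int :=
  match title with
  | none => (7, 10)
  | some s =>
    if s = "" then (7, 10)
    else
      let t := PySem.Str.lower s
      if loopAnti t antiTitles then (99, 0)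
      else loopTiers t tiersA

-- ===== PORT B =====
def tierKeywords : List (Int × List String) :=
  [(1, ["cfo", "chief financial", "finance director", "head of finance", "vp finance",
        "payroll", "controller", "treasurer", "financial controller"]),
   (2, ["coo", "chief operating", "operations director", "head of operations",
        "vp operations", "operations manager", "chief admin"]),
   (3, ["hr director", "head of hr", "head of people", "hr manager",
        "people & culture", "chief human", "vp people", "head of talent"]),
   (4, ["ceo", "chief executive", "founder", "co-founder", "owner",
        "managing director", "general manager", "president", "sole proprietor"]),
   (5, ["cto", "chief technology", "vp engineering", "head of engineering",
        "engineering director", "technical director"]),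
   (6, ["head of sales", "sales director", "business development",
        "commercial director", "chief revenue"])]

def tierScore : PySem.Dict Int Int :=
  PySem.Dict.ofList [(1, 100), (2, 90), (3, 85), (4, 70), (5, 50), (6, 30)]

def get_role_tier_alt (title : Option String) : Int × Int :=
  match title with
  | none => (7, 10)
  | some s =>
    if s = "" then (7, 10)
    else
      let t := PySem.Str.lower s
      if antiTitles.any (fun anti => PySem.Str.isIn anti t) then (99, 0)
      else
        let hits := (tierKeywords.filter
          (fun p => p.2.any (fun kw => PySem.Str.isIn kw t))).map (·.1)
        match PySem.List.min? hits (fun x => x) with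
        | none => (7, 10)
        | some best => (best, PySem.Dict.getD tierScore best 0)

-- ===== PRECONDITION & SPEC =====
def Spec_get_role_tier (title : Option String) (out : Int × Int) : Prop := out = get_role_tier_alt title
instance (title : Option String) (out : Int × Int) : Decidable (Spec_get_role_tier title out) := by unfold Spec_get_role_tier; infer_instance

-- ===== CLAIM (what is proved, stated in full; the proofs are below) =====
def Claim_equal_get_role_tier : Prop := ∀ (title : Option String), Dom_get_role_tier title → Spec_get_role_tier title (get_role_tier title)

-- ===== LEMMAS AND PROOFS =====

theorem loopAnti_eq_any (t : String) (l : List String) :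
    loopAnti t l = l.any (fun anti => PySem.Str.isIn anti t) := by
  induction l with
  | nil => rfl
  | cons a rest ih =>
    unfold loopAnti
    rw [ih, List.any_cons]
    cases h : PySem.Str.isIn a t <;> simp

theorem loopKws_eq_if (t : String) (tier score : Int) (kws : List String) :
    loopKws t tier score kws =
      if kws.any (fun kw => PySem.Str.isIn kw t) then some (tier, score) else none := by
  induction kws with
  | nil => rfl
  | cons kw rest ih =>
    unfold loopKws
    rw [ih, List.any_cons]
    cases h : PySem.Str.isIn kw t <;> simp

theorem main_eq (t : String) :
    loopTiers t tiersA =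
      (match PySem.List.min? ((tierKeywords.filter
          (fun p => p.2.any (fun kw => PySem.Str.isIn kw t))).map (·.1)) (fun x => x) with
      | none => ((7 : Int), (10 : Int))
      | some best => (best, PySem.Dict.getD tierScore best 0)) := by
  simp only [tiersA, tierKeywords, loopTiers, loopKws_eq_if, List.filter_cons, List.filter_nil]
  cases h1 : (["cfo", "chief financial", "finance director", "head of finance", "vp finance", "payroll", "controller", "treasurer", "financial controller"] : List String).any (fun kw => PySem.Str.isIn kw t) <;>
  cases h2 : (["coo", "chief operating", "operations director", "head of operations", "vp operations", "operations manager", "chief admin"] : List String).any (fun kw => PySem.Str.isIn kw t) <;>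
  cases h3 : (["hr director", "head of hr", "head of people", "hr manager", "people & culture", "chief human", "vp people", "head of talent"] : List String).any (fun kw => PySem.Str.isIn kw t) <;>
  cases h4 : (["ceo", "chief executive", "founder", "co-founder", "owner", "managing director", "general manager", "president", "sole proprietor"] : List String).any (fun kw => PySem.Str.isIn kw t) <;>
  cases h5 : (["cto", "chief technology", "vp engineering", "head of engineering", "engineering director", "technical director"] : List String).any (fun kw => PySem.Str.isIn kw t) <;>
  cases h6 : (["head of sales", "sales director", "business development", "commercial director", "chief revenue"] : List String).any (fun kw => PySem.Str.isIn kw t) <;>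
  rfl


-- ===== VERDICT (by name: the statement is the Claim_ definition above) =====
theorem get_role_tier_spec : Claim_equal_get_role_tier := by
  intro title _
  unfold Spec_get_role_tier
  cases title with
  | none => rfl
  | some s =>
    simp only [get_role_tier, get_role_tier_alt, loopAnti_eq_any]
    split_ifs
    · rfl
    · rfl
    · exact main_eq _
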